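-- pv_equiv track=rewrite | github.com/Sord27/ttt | device/python/BAM_8004/generate_documentation.py | get_actors_dict
-- ===== SOURCE A (Python) =====
-- def get_actors_dict(input_dict):
--     actors_dict = {}
--     for key in input_dict.keys():
--         actor = input_dict[key]["actors"]
--         if actor in actors_dict.keys():
--             actor_list = actors_dict[actor]
--             actor_list.append(key)
--             actors_dict[actor] = actor_list
--         else:
--             actors_dict[actor] = [key]
--     return actors_dict
-- ===== SOURCE B (Python) =====
-- def get_actors_dict(input_dict):
--     actors = list(dict.fromkeys(v["actors"] for v in input_dict.values()))
--     return {a: [k for k, v in input_dict.items() if v["actors"] == a] for a in actors}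
-- ===== Notes on version B (the rewrite author's own statement) =====
-- stated objective: alternative
-- what changed: Replaces A's single-pass mutable-bucket accumulation (dict of growing lists with membership test and append) by a two-phase computation: ordered dedup of the actor sequence, then one filtering comprehension per distinct actor.
import Mathlib
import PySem

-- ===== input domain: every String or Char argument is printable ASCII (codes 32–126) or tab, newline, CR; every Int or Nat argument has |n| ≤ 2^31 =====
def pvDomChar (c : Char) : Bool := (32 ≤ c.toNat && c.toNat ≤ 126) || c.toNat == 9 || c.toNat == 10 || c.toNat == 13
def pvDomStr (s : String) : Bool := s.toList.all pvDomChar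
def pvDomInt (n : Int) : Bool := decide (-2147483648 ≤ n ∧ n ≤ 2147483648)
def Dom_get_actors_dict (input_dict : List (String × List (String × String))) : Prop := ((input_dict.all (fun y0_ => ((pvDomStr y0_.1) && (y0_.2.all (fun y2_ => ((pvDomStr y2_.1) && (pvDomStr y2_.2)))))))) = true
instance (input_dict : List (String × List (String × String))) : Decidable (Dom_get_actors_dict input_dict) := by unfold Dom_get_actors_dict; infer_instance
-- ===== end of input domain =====

-- B replaces A's single-pass mutable-bucket accumulation by ordered dedup of the actors plus one filtering pass per distinct actor (alternative decomposition, not faster).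

-- shared helper: v["actors"] on the inner dict (total via getD; Pre_ guarantees the key is present)
def pvActor (v : List (String × String)) : String := (PySem.Dict.ofList v).getD "actors" ""

-- ===== PORT A =====
def get_actors_dict (input_dict : List (String × List (String × String))) : List (String × List String) :=
  (input_dict.foldl
    (fun (actors_dict : PySem.Dict String (List String)) kv =>
      let actor := pvActor kv.2
      if actors_dict.contains actor then
        let actor_list := actors_dict.getD actor []
        actors_dict.insert actor (actor_list ++ [kv.1])
      else
        actors_dict.insert actor [kv.1])
    PySem.Dict.empty).items

-- ===== PORT B =====
-- dict comprehension over the deduped (hence distinct) actors appends fresh keys in order: its items ARE this map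
def get_actors_dict_alt (input_dict : List (String × List (String × String))) : List (String × List String) :=
  let actors := PySem.List.dedup (input_dict.map (fun kv => pvActor kv.2))
  actors.map (fun a => (a, (input_dict.filter (fun kv => pvActor kv.2 == a)).map (·.1)))

-- ===== PRECONDITION & SPEC =====
-- Pre_ excludes inputs where some value dict lacks the key "actors": Python A raises KeyError there.
def Pre_get_actors_dict (input_dict : List (String × List (String × String))) : Prop :=
  (input_dict.all (fun kv => kv.2.any (fun p => p.1 == "actors"))) = true
instance (input_dict : List (String × List (String × String))) : Decidable (Pre_get_actors_dict input_dict) := by unfold Pre_get_actors_dict; infer_instance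
def pvWitness_get_actors_dict : (List (String × List (String × String))) :=
  [("x", [("actors", "A")]), ("y", [("actors", "B")]), ("z", [("actors", "A")])]
def Spec_get_actors_dict (input_dict : List (String × List (String × String))) (out : List (String × List String)) : Prop := out = get_actors_dict_alt input_dict
instance (input_dict : List (String × List (String × String))) (out : List (String × List String)) : Decidable (Spec_get_actors_dict input_dict out) := by unfold Spec_get_actors_dict; infer_instance

-- ===== CLAIM (what is proved, stated in full; the proofs are below) =====
def Claim_equal_get_actors_dict : Prop := ∀ (input_dict : List (String × List (String × String))), Dom_get_actors_dict input_dict → Pre_get_actors_dict input_dict → Spec_get_actors_dict input_dict (get_actors_dict input_dict)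

-- ===== LEMMAS AND PROOFS =====

-- A's branch on membership is exactly Dict.modify with default []
lemma step_eq_modify (d : PySem.Dict String (List String)) (kv : String × List (String × String)) :
    (let actor := pvActor kv.2
     if d.contains actor then
       let actor_list := d.getD actor []
       d.insert actor (actor_list ++ [kv.1])
     else
       d.insert actor [kv.1])
    = d.modify (pvActor kv.2) [] (· ++ [kv.1]) := by
  by_cases h : d.contains (pvActor kv.2)
  · simp [h, PySem.Dict.modify, PySem.Dict.getD_eq_get?_getD]
  · simp [h, PySem.Dict.modify, PySem.Dict.getD_of_not_contains]

-- ===== VERDICT (by name: the statement is the Claim_ definition above) =====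
theorem get_actors_dict_spec : Claim_equal_get_actors_dict := by
  intro input_dict _ _
  unfold Spec_get_actors_dict get_actors_dict get_actors_dict_alt
  -- rewrite A's loop body to a Dict.modify loop over the (actor, key) pairs
  have hstep : input_dict.foldl
      (fun (actors_dict : PySem.Dict String (List String)) kv =>
        let actor := pvActor kv.2
        if actors_dict.contains actor then
          let actor_list := actors_dict.getD actor []
          actors_dict.insert actor (actor_list ++ [kv.1])
        else
          actors_dict.insert actor [kv.1])
      PySem.Dict.empty
      = (input_dict.map (fun kv => (pvActor kv.2, kv.1))).foldl
          (fun d p => d.modify p.1 [] (· ++ [p.2])) PySem.Dict.empty := by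
    rw [List.foldl_map]
    congr 1
    funext d kv
    exact step_eq_modify d kv
  rw [hstep]
  set l := input_dict.map (fun kv => (pvActor kv.2, kv.1)) with hl
  set D := l.foldl (fun d p => d.modify p.1 [] (· ++ [p.2])) PySem.Dict.empty with hD
  have hnd : D.keys.Nodup := by
    rw [hD]
    exact PySem.Dict.nodup_keys_foldl_modify_key l (·.1) [] (fun d p => (· ++ [p.2])) _
      PySem.Dict.nodup_keys_empty
  have hkeys : D.keys = PySem.List.dedup (input_dict.map (fun kv => pvActor kv.2)) := by
    rw [hD, PySem.Dict.keys_foldl_modify_key]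
    simp [hl, PySem.Set.update_nil_left, Function.comp_def]
  rw [PySem.Dict.items_eq_map_keys D hnd [], hkeys]
  apply List.map_congr_left
  intro a _
  have hg : D.getD a [] = (l.filter (fun p => p.1 == a)).map (·.2) := by
    rw [hD, PySem.Dict.getD_foldl_modify_append]
    simp
  rw [hg, hl]
  simp [List.filter_map, Function.comp_def]
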